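-- pv_equiv track=rewrite | github.com/abbasmoosajee07/EverybodyCodes | 2024/07/2024Day07.py | score_one
-- ===== SOURCE A (Python) =====
-- def score_one(action_sequence, track_map, memo):
--     action_key = tuple(action_sequence)
--     if action_key in memo:
--         return memo[action_key]
--
--     current_power = 0
--     total_score = 0
--     action_index = 0
--
--     for track_symbol in track_map:
--         if track_symbol == '=' or track_symbol == 'S':
--             track_symbol = action_sequence[action_index % len(action_sequence)]
--
--         if track_symbol == '+':
--             current_power += 1
--         elif track_symbol == '-':
--             current_power -= 1
--         else:
--             assert track_symbol == '=' or track_symbol == 'S', track_symbol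
--
--         total_score += current_power
--         action_index += 1
--
--     memo[action_key] = (total_score, current_power)
--     return (total_score, current_power)
-- ===== SOURCE B (Python) =====
-- def score_one(action_sequence, track_map, memo):
--     action_key = tuple(action_sequence)
--     if action_key in memo:
--         return memo[action_key]
--
--     value = {'+': 1, '-': -1, '=': 0, 'S': 0}
--     n = len(track_map)
--
--     def dval(i):
--         s = track_map[i]
--         if s == '=' or s == 'S':
--             s = action_sequence[i % len(action_sequence)]
--         assert s in value, s
--         return value[s]
--
--     deltas = [dval(i) for i in range(n)]
--     # a delta at position i contributes to every later prefix sum, i.e. (n - i) times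
--     total_score = sum(w * d for w, d in zip(range(n, 0, -1), deltas))
--     current_power = sum(deltas)
--
--     memo[action_key] = (total_score, current_power)
--     return (total_score, current_power)
-- ===== Notes on version B (the rewrite author's own statement) =====
-- stated objective: alternative
-- what changed: A's single stateful loop (running power, running prefix-sum score, action counter) is replaced by an index-based delta table built through a symbol-to-delta dict over range(n), with the score computed as a dot product of the deltas with the countdown weights range(n,0,-1) and the power as a plain sum.
import Mathlib
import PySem

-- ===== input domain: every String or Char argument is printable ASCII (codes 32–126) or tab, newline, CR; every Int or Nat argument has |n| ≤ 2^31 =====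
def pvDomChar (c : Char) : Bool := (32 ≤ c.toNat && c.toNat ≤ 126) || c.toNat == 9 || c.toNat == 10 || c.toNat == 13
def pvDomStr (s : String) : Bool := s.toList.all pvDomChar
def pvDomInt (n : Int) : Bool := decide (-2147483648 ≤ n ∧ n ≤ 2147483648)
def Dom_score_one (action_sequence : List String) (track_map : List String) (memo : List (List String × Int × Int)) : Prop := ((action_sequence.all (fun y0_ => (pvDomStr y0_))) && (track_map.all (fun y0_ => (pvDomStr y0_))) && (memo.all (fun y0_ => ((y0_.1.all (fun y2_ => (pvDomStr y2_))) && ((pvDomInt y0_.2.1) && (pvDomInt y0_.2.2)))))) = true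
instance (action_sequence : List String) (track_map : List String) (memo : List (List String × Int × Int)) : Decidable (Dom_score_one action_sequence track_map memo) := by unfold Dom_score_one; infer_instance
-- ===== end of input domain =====

-- B replaces A's single stateful loop (running power + running prefix-sum score + action counter)
-- by an index-based delta table built through a symbol→delta dict over range(n), with the score a
-- dot product against the countdown weights range(n, 0, -1); objective: alternative decomposition.
-- Both Pythons also write the result into `memo`; the equivalence proved is about the RETURN value
-- only (the memo write is identical in both and not modelled).

-- ===== PORT A =====
-- 'action_key in memo' / 'memo[action_key]': first-match lookup in the association list
def memoLookup (memo : List (List String × Int × Int)) (k : List String) : Option (Int × Int) :=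
  match memo with
  | [] => none
  | (k', v) :: rest => if k' = k then some v else memoLookup rest k

-- one loop step of A: state (current_power, total_score, action_index)
def stepA (action_sequence : List String) (st : Int × Int × Nat) (sym : String) : Int × Int × Nat :=
  let sym2 := if sym = "=" ∨ sym = "S" then action_sequence.getD (st.2.2 % action_sequence.length) "" else sym
  let cp := if sym2 = "+" then st.1 + 1 else if sym2 = "-" then st.1 - 1 else st.1
  (cp, st.2.1 + cp, st.2.2 + 1)

def score_one (action_sequence : List String) (track_map : List String) (memo : List (List String × Int × Int)) : Int × Int :=
  match memoLookup memo action_sequence with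
  | some v => v
  | none =>
    let st := track_map.foldl (stepA action_sequence) (0, 0, 0)
    (st.2.1, st.1)

-- ===== PORT B =====
-- Source B's symbol→delta table `value`
def pvValue : PySem.Dict String Int := PySem.Dict.mk [("+", 1), ("-", -1), ("=", 0), ("S", 0)]

-- Source B's `dval(i)` (closure over action_sequence and track_map)
def dvalB (action_sequence : List String) (track_map : List String) (i : Int) : Int :=
  let s := (PySem.List.pyGet? track_map i).getD ""
  let s2 := if s = "=" ∨ s = "S"
            then (PySem.List.pyGet? action_sequence (PySem.Int.mod i (action_sequence.length : Int))).getD ""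
            else s
  PySem.Dict.getD pvValue s2 0

def score_one_alt (action_sequence : List String) (track_map : List String) (memo : List (List String × Int × Int)) : Int × Int :=
  match (PySem.Dict.mk memo).get? action_sequence with
  | some v => v
  | none =>
    let n : Int := track_map.length
    let deltas := (PySem.List.pyRange 0 n 1).map (dvalB action_sequence track_map)
    let total_score := ((PySem.List.pyRange n 0 (-1)).zip deltas).foldl (fun a p => a + p.1 * p.2) 0
    let current_power := deltas.sum
    (total_score, current_power)

-- ===== PRECONDITION & SPEC =====
-- Pre_ excludes exactly the inputs where Python A raises: a memo miss together with some
-- effective track symbol outside {'+','-','=','S'} (AssertionError) or a '='/'S' symbol with an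
-- empty action_sequence (ZeroDivisionError in `action_index % len(action_sequence)`).
def Pre_score_one (action_sequence : List String) (track_map : List String) (memo : List (List String × Int × Int)) : Prop :=
  action_sequence ∈ memo.map (·.1) ∨
  ∀ i, i < track_map.length →
    (if track_map[i]! = "=" ∨ track_map[i]! = "S"
     then action_sequence ≠ [] ∧
          (action_sequence.getD (i % action_sequence.length) "" = "+" ∨
           action_sequence.getD (i % action_sequence.length) "" = "-" ∨
           action_sequence.getD (i % action_sequence.length) "" = "=" ∨
           action_sequence.getD (i % action_sequence.length) "" = "S")
     else track_map[i]! = "+" ∨ track_map[i]! = "-")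
instance (action_sequence : List String) (track_map : List String) (memo : List (List String × Int × Int)) : Decidable (Pre_score_one action_sequence track_map memo) := by unfold Pre_score_one; infer_instance

def pvWitness_score_one : List String × List String × (List (List String × Int × Int)) :=
  (["+"], ["=", "-", "+"], [])

def Spec_score_one (action_sequence : List String) (track_map : List String) (memo : List (List String × Int × Int)) (out : Int × Int) : Prop := out = score_one_alt action_sequence track_map memo
instance (action_sequence : List String) (track_map : List String) (memo : List (List String × Int × Int)) (out : Int × Int) : Decidable (Spec_score_one action_sequence track_map memo out) := by unfold Spec_score_one; infer_instance

-- ===== CLAIM (what is proved, stated in full; the proofs are below) =====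
def Claim_equal_score_one : Prop := ∀ (action_sequence : List String) (track_map : List String) (memo : List (List String × Int × Int)), Dom_score_one action_sequence track_map memo → Pre_score_one action_sequence track_map memo → Spec_score_one action_sequence track_map memo (score_one action_sequence track_map memo)

-- ===== LEMMAS AND PROOFS =====

-- the delta A's step adds to current_power at absolute index i
def dA (as_ : List String) (i : Nat) (s : String) : Int :=
  let s2 := if s = "=" ∨ s = "S" then as_.getD (i % as_.length) "" else s
  if s2 = "+" then 1 else if s2 = "-" then -1 else 0

-- deltas of the remaining track starting at absolute index i
def dlist (as_ : List String) : List String → Nat → List Int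
  | [], _ => []
  | s :: r, i => dA as_ i s :: dlist as_ r (i + 1)

-- each delta weighted by the length of the suffix starting at it
def wsum : List Int → Int
  | [] => 0
  | d :: r => d * (r.length + 1) + wsum r

lemma dlist_length (as_ : List String) : ∀ ts i, (dlist as_ ts i).length = ts.length := by
  intro ts; induction ts with
  | nil => intro i; rfl
  | cons s r ih => intro i; simp [dlist, ih]

lemma dlist_getElem (as_ : List String) : ∀ (ts : List String) (j k : Nat) (h : k < ts.length),
    (dlist as_ ts j)[k]'(by rw [dlist_length]; exact h) = dA as_ (j + k) ts[k] := by
  intro ts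
  induction ts with
  | nil => intro j k h; simp at h
  | cons s r ih =>
    intro j k h
    cases k with
    | zero => simp [dlist]
    | succ k' =>
      simp only [dlist, List.getElem_cons_succ]
      rw [ih (j + 1) k' (by simpa using h)]
      congr 1; omega

lemma stepA_eq (as_ : List String) (cp tot : Int) (i : Nat) (s : String) :
    stepA as_ (cp, tot, i) s = (cp + dA as_ i s, tot + (cp + dA as_ i s), i + 1) := by
  simp only [stepA, dA]
  split_ifs <;> simp <;> ring

lemma foldA_eq (as_ : List String) : ∀ (ts : List String) (i : Nat) (cp tot : Int),
    ts.foldl (stepA as_) (cp, tot, i) =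
      (cp + (dlist as_ ts i).sum,
       tot + ts.length * cp + wsum (dlist as_ ts i),
       i + ts.length) := by
  intro ts
  induction ts with
  | nil => intro i cp tot; simp [dlist, wsum]
  | cons s r ih =>
    intro i cp tot
    simp only [List.foldl_cons, stepA_eq]
    rw [ih (i + 1)]
    simp only [dlist, wsum, List.sum_cons, List.length_cons, dlist_length]
    refine Prod.ext ?_ (Prod.ext ?_ ?_) <;> simp <;> ring

lemma pvValue_getD (s : String) :
    PySem.Dict.getD pvValue s 0 = if s = "+" then 1 else if s = "-" then -1 else 0 := by
  by_cases h1 : s = "+"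
  · subst h1; decide
  by_cases h2 : s = "-"
  · subst h2; decide
  by_cases h3 : s = "="
  · subst h3; decide
  by_cases h4 : s = "S"
  · subst h4; decide
  have e1 : (("+" : String) == s) = false := by simp [Ne.symm h1]
  have e2 : (("-" : String) == s) = false := by simp [Ne.symm h2]
  have e3 : (("=" : String) == s) = false := by simp [Ne.symm h3]
  have e4 : (("S" : String) == s) = false := by simp [Ne.symm h4]
  simp [pvValue, PySem.Dict.getD, PySem.Dict.get?, List.find?, e1, e2, e3, e4, h1, h2]

lemma dvalB_eq (as_ tm : List String) (k : Nat) (h : k < tm.length) :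
    dvalB as_ tm (k : Int) = dA as_ k tm[k] := by
  simp only [dvalB, dA, PySem.List.pyGet?_natCast, List.getElem?_eq_getElem h, Option.getD_some]
  rw [PySem.Int.mod_natCast]
  by_cases hs : tm[k] = "=" ∨ tm[k] = "S"
  · simp only [if_pos hs, PySem.List.pyGet?_natCast, pvValue_getD, List.getD]
  · simp only [if_neg hs, pvValue_getD]

lemma deltas_eq (as_ tm : List String) :
    (PySem.List.pyRange 0 (tm.length : Int) 1).map (dvalB as_ tm) = dlist as_ tm 0 := by
  apply List.ext_getElem
  · simp [PySem.List.length_pyRange_one, dlist_length]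
  · intro k h1 h2
    have hk : k < tm.length := by
      simpa [PySem.List.length_pyRange_one] using h1
    rw [List.getElem_map]
    rw [PySem.List.getElem_pyRange_one]
    rw [dlist_getElem as_ tm 0 k hk]
    rw [show (0 : Int) + (k : Int) = (k : Int) by ring, dvalB_eq as_ tm k hk]
    simp

lemma zipfold_eq : ∀ (ds : List Int) (acc : Int),
    ((PySem.List.pyRange (ds.length : Int) 0 (-1)).zip ds).foldl (fun a p => a + p.1 * p.2) acc
      = acc + wsum ds := by
  intro ds
  induction ds with
  | nil => intro acc; simp [PySem.List.pyRange_neg_one_eq_nil, wsum]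
  | cons d r ih =>
    intro acc
    have hlen : ((d :: r).length : Int) = (r.length : Int) + 1 := by simp
    rw [hlen, PySem.List.pyRange_neg_one_cons (by positivity)]
    simp only [List.zip_cons_cons, List.foldl_cons, add_sub_cancel_right, ih, wsum]
    ring

lemma memoLookup_eq (k : List String) : ∀ (memo : List (List String × Int × Int)),
    memoLookup memo k = (PySem.Dict.mk memo).get? k := by
  intro memo
  induction memo with
  | nil => simp [memoLookup, PySem.Dict.get?]
  | cons p rest ih =>
    obtain ⟨k', v⟩ := p
    rw [memoLookup, PySem.Dict.get?_mk_cons, ih]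
    simp [beq_iff_eq]

-- ===== VERDICT (by name: the statement is the Claim_ definition above) =====
theorem score_one_spec : Claim_equal_score_one := by
  intro as_ tm memo _ _
  unfold Spec_score_one score_one score_one_alt
  rw [memoLookup_eq]
  cases h : (PySem.Dict.mk memo).get? as_ with
  | some v => rfl
  | none =>
    simp only [deltas_eq, foldA_eq]
    rw [show ((tm.length : Int)) = ((dlist as_ tm 0).length : Int) by rw [dlist_length], zipfold_eq]
    simp
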